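-- pv_equiv track=rewrite | github.com/yeonwooz/algorithms_study | kiwkim/221101_pg_92334.py | solution
-- ===== SOURCE A (Python) =====
-- def solution(id_list, report, k):
--     from collections import defaultdict
--     dic = defaultdict(set)
--     answer = []
--     user_idx = defaultdict()
--     for i in range(len(id_list)):
--         answer.append(0)
--         user_idx[id_list[i]] = i
--     for rep in report:
--         usr, bad = rep.split()
--         dic[bad].add(usr)
--
--     for key in dic.values():
--         if len(key) >= k:
--             for r in key:
--                 answer[user_idx[r]] += 1
--     return answer
-- ===== SOURCE B (Python) =====
-- def solution(id_list, report, k):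
--     # sort the distinct (reporter, target) pairs by target and scan runs of equal
--     # targets: each run IS one target's distinct-reporter group, so no per-target
--     # dict of sets or counter is ever built
--     idx = {u: i for i, u in enumerate(id_list)}
--     answer = [0] * len(id_list)
--     pairs = sorted(dict.fromkeys(tuple(r.split()) for r in report),
--                    key=lambda p: p[1])
--     while pairs:
--         target = pairs[0][1]
--         run = 1
--         while run < len(pairs) and pairs[run][1] == target:
--             run += 1
--         if run >= k:
--             for usr, _ in pairs[:run]:
--                 answer[idx[usr]] += 1
--         pairs = pairs[run:]
--     return answer
-- ===== Notes on version B (the rewrite author's own statement) =====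
-- stated objective: alternative
-- what changed: A groups reporters into a dict of per-target sets and then walks those sets with a nested loop; B instead sorts the distinct (reporter, target) pairs by target and scans runs of equal targets in one sweep, so each run's length is the target's distinct-reporter count and no dict of sets or counter is built.
import Mathlib
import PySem

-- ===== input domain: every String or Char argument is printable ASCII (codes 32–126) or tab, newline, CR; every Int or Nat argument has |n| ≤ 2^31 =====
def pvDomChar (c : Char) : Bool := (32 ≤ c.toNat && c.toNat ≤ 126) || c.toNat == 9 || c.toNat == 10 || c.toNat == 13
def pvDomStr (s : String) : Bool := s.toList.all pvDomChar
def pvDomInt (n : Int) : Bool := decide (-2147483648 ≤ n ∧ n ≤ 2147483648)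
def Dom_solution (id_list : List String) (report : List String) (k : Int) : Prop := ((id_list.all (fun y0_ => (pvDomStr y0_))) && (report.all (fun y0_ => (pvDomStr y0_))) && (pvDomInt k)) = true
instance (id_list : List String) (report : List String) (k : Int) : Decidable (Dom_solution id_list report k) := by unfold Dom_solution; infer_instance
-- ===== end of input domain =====

-- B replaces A's dict of per-target reporter-sets and its nested reporting loop by sorting the
-- distinct (reporter, target) pairs by target and scanning runs of equal targets in one sweep
-- (alternative decomposition: grouping by sorting instead of by hashing).

-- ===== PORT A =====
def solution (id_list : List String) (report : List String) (k : Int) : List Int :=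
  let st := (PySem.List.pyRange 0 (id_list.length : Int)).foldl
    (fun (st : List Int × PySem.Dict String Int) i =>
      (st.1 ++ [(0 : Int)], st.2.insert (PySem.List.pyGetD id_list i "") i))
    ([], PySem.Dict.empty)
  let answer := st.1
  let user_idx := st.2
  let dic := report.foldl
    (fun (d : PySem.Dict String (PySem.Set String)) rep =>
      match PySem.Str.split₀ rep with
      | [usr, bad] => d.modify bad PySem.Set.empty (fun s => PySem.Set.add s usr)
      | _ => d)   -- Python raises ValueError here (unpacking); excluded by Pre_solution
    PySem.Dict.empty
  dic.values.foldl
    (fun ans key =>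
      if k ≤ PySem.Set.len key then
        key.foldl (fun a r =>
          PySem.List.pySetD a (user_idx.getD r 0)
            (PySem.List.pyGetD a (user_idx.getD r 0) 0 + 1)) ans
      else ans)
    answer

-- ===== PORT B =====
-- B-side helpers: a pair's reporter p[0] and target p[1]
def pvFst (t : List String) : String := t.headD ""
def pvSnd (t : List String) : String := t.getD 1 ""

-- Source B's while-loop over the sorted pairs: the inner index scan that computes 'run' is the
-- maximal prefix of equal targets, so 'pairs[:run]' is 'p :: takeWhile' and 'pairs[run:]' is
-- 'dropWhile'; the 'for usr, _ in …' unpacking is ported as q[0] (Python raises ValueError on a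
-- pair of another length, excluded by Pre_solution)
def pvAltLoop (idx : PySem.Dict String Int) (k : Int) : List (List String) → List Int → List Int
  | [], answer => answer
  | p :: ps, answer =>
    let target := pvSnd p
    let grp := p :: ps.takeWhile (fun q => pvSnd q == target)
    let answer' :=
      if k ≤ (grp.length : Int) then
        grp.foldl (fun a q =>
          PySem.List.pySetD a (idx.getD (pvFst q) 0)
            (PySem.List.pyGetD a (idx.getD (pvFst q) 0) 0 + 1)) answer
      else answer
    pvAltLoop idx k (ps.dropWhile (fun q => pvSnd q == target)) answer'
termination_by l _ => l.length
decreasing_by simpa using Nat.lt_succ_of_le (List.length_dropWhile_le ..)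

def solution_alt (id_list : List String) (report : List String) (k : Int) : List Int :=
  let idx := (PySem.List.enumerate id_list).foldl
    (fun (d : PySem.Dict String Int) iu => d.insert iu.2 iu.1)
    PySem.Dict.empty
  let answer := List.replicate id_list.length (0 : Int)
  let pairs := PySem.List.sorted (PySem.List.dedup (report.map (fun rep => PySem.Str.split₀ rep)))
    (fun p => pvSnd p) false
  pvAltLoop idx k pairs answer

-- ===== PRECONDITION & SPEC =====
-- Pre_ excludes exactly the inputs on which A raises: a report that does not split into exactly two
-- whitespace-separated fields (ValueError on unpacking), and a report whose reporter is unknown to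
-- id_list while its target has ≥ k distinct reporters (KeyError on user_idx[r]).
def Pre_solution (id_list : List String) (report : List String) (k : Int) : Prop :=
  ∀ rep ∈ report, (PySem.Str.split₀ rep).length = 2 ∧
    ((PySem.Str.split₀ rep).headD "" ∈ id_list ∨
      (((PySem.List.dedup (report.map (fun rep => PySem.Str.split₀ rep))).countP
        (fun t => t.getD 1 "" == (PySem.Str.split₀ rep).getD 1 "") : Nat) : Int) < k)
instance (id_list : List String) (report : List String) (k : Int) : Decidable (Pre_solution id_list report k) := by unfold Pre_solution; infer_instance

def pvWitness_solution : List String × List String × Int :=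
  (["muzi", "frodo", "apeach", "neo"],
   ["muzi frodo", "apeach frodo", "frodo neo", "muzi neo", "apeach muzi"], 2)

def Spec_solution (id_list : List String) (report : List String) (k : Int) (out : List Int) : Prop := out = solution_alt id_list report k
instance (id_list : List String) (report : List String) (k : Int) (out : List Int) : Decidable (Spec_solution id_list report k out) := by unfold Spec_solution; infer_instance

-- ===== CLAIM (what is proved, stated in full; the proofs are below) =====
def Claim_equal_solution : Prop := ∀ (id_list : List String) (report : List String) (k : Int), Dom_solution id_list report k → Pre_solution id_list report k → Spec_solution id_list report k (solution id_list report k)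

-- ===== LEMMAS AND PROOFS =====

-- the user → (last) index dictionary both programs build
def pvIdxD (id_list : List String) : PySem.Dict String Int :=
  (PySem.List.enumerate id_list).foldl
    (fun (d : PySem.Dict String Int) iu => d.insert iu.2 iu.1) PySem.Dict.empty

def pvIota (id_list : List String) (u : String) : Int := (pvIdxD id_list).getD u 0

-- one 'answer[j] += 1'
def pvInc (j : Int) (a : List Int) : List Int :=
  PySem.List.pySetD a j (PySem.List.pyGetD a j 0 + 1)

lemma pv_pair_shape (t : List String) (h : t.length = 2) : t = [pvFst t, pvSnd t] := by
  match t, h with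
  | [u, b], _ => rfl

lemma pv_enum_fst_bound (xs : List String) :
    ∀ (s i : Int), i ∈ (PySem.List.enumerate xs s).map (·.1) → s ≤ i ∧ i < s + xs.length := by
  induction xs with
  | nil => intro s i h; simp [PySem.List.enumerate] at h
  | cons x xs ih =>
    intro s i h
    rw [PySem.List.enumerate_cons] at h
    simp only [List.map_cons, List.mem_cons] at h
    rcases h with h | h
    · subst h
      refine ⟨le_refl _, ?_⟩
      have : (0:Int) ≤ (xs.length : Int) := by positivity
      simp only [List.length_cons]
      push_cast
      omega
    · have := ih (s + 1) i (by simpa using h)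
      simp at this ⊢; omega

lemma pv_idx_fold_getD (l : List (Int × String)) :
    ∀ (d : PySem.Dict String Int) (u : String),
      (l.foldl (fun d iu => d.insert iu.2 iu.1) d).getD u 0 = d.getD u 0 ∨
      ∃ p ∈ l, (l.foldl (fun d iu => d.insert iu.2 iu.1) d).getD u 0 = p.1 := by
  induction l with
  | nil => intro d u; left; rfl
  | cons p l ih =>
    intro d u
    rcases ih (d.insert p.2 p.1) u with h | ⟨q, hq, h⟩
    · by_cases he : u = p.2
      · right
        exact ⟨p, List.mem_cons_self .., by
          rw [List.foldl_cons, h, he, PySem.Dict.getD_insert_self]⟩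
      · left
        rw [List.foldl_cons, h, PySem.Dict.getD_insert_of_ne _ _ _ he]
    · right; exact ⟨q, List.mem_cons_of_mem _ hq, h⟩

lemma pv_iota_range (id_list : List String) (u : String) (hu : u ∈ id_list) :
    0 ≤ pvIota id_list u ∧ pvIota id_list u < (id_list.length : Int) := by
  have hlen : 0 < id_list.length := List.length_pos_of_mem hu
  unfold pvIota pvIdxD
  rcases pv_idx_fold_getD (PySem.List.enumerate id_list) PySem.Dict.empty u with h | ⟨p, hp, h⟩
  · rw [h, PySem.Dict.getD_empty]
    constructor
    · rfl
    · exact_mod_cast hlen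
  · rw [h]
    have := pv_enum_fst_bound id_list 0 p.1 (List.mem_map_of_mem hp)
    simpa using this

lemma pv_A_init (xs : List String) :
    (PySem.List.pyRange 0 (xs.length : Int)).foldl
      (fun (st : List Int × PySem.Dict String Int) i =>
        (st.1 ++ [(0 : Int)], st.2.insert (PySem.List.pyGetD xs i "") i))
      ([], PySem.Dict.empty)
    = (List.replicate xs.length 0, pvIdxD xs) := by
  have aux : ∀ n, n ≤ xs.length →
      (PySem.List.pyRange 0 (n : Int)).foldl
        (fun (st : List Int × PySem.Dict String Int) i =>
          (st.1 ++ [(0 : Int)], st.2.insert (PySem.List.pyGetD xs i "") i))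
        ([], PySem.Dict.empty)
      = (List.replicate n 0,
         (PySem.List.enumerate (xs.take n)).foldl
           (fun (d : PySem.Dict String Int) iu => d.insert iu.2 iu.1) PySem.Dict.empty) := by
    intro n hn
    induction n with
    | zero => rfl
    | succ n ih =>
      have hn' : n ≤ xs.length := Nat.le_of_succ_le hn
      have hlt : n < xs.length := hn
      have hcast : ((n + 1 : Nat) : Int) = (n : Int) + 1 := by push_cast; ring
      rw [hcast, PySem.List.pyRange_one_succ_right (by positivity), List.foldl_append, ih hn']
      have htake : xs.take (n + 1) = xs.take n ++ [xs[n]] := by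
        rw [List.take_add_one, List.getElem?_eq_getElem hlt]
        rfl
      rw [htake, PySem.List.enumerate_append, List.foldl_append]
      simp only [List.foldl_cons, List.foldl_nil]
      have hget : PySem.List.pyGetD xs ((n : Nat) : Int) "" = xs[n] := by
        rw [PySem.List.pyGetD_natCast, List.getD_eq_getElem _ _ hlt]
      have hlen : (xs.take n).length = n := List.length_take_of_le hn'
      simp only [Prod.mk.injEq]
      refine ⟨by rw [← List.replicate_succ'], ?_⟩
      rw [hget, hlen]
      simp [PySem.List.enumerate]
  have := aux xs.length le_rfl
  rw [this, List.take_length]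
  rfl

lemma pv_add_eq {α : Type} [BEq α] [LawfulBEq α] {s : PySem.Set α} {x : α} :
    s.add x = if x ∈ s then s else s ++ [x] := by
  by_cases h : x ∈ s
  · have hc : s.contains x = true := (PySem.Set.contains_iff s x).mpr h
    simp [PySem.Set.add, h]
  · have hc : s.contains x = false := by
      rw [Bool.eq_false_iff]
      intro hcon
      exact h ((PySem.Set.contains_iff s x).mp hcon)
    simp [PySem.Set.add, h]

lemma pv_ofList_append_singleton {α : Type} [BEq α] (l : List α) (x : α) :
    PySem.Set.ofList (l ++ [x]) = (PySem.Set.ofList l).add x := by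
  rw [PySem.Set.ofList_eq_foldl, PySem.Set.ofList_eq_foldl, List.foldl_append]
  rfl

lemma pv_ofList_filter {α : Type} [BEq α] [LawfulBEq α] (p : α → Bool) (l : List α) :
    PySem.Set.ofList (l.filter p) = (PySem.Set.ofList l).filter p := by
  induction l using List.reverseRecOn with
  | nil => rfl
  | append_singleton l x ih =>
    rw [List.filter_append, pv_ofList_append_singleton]
    by_cases hp : p x = true
    · simp only [List.filter_cons, hp, if_pos, List.filter_nil]
      rw [pv_ofList_append_singleton, ih, pv_add_eq, pv_add_eq]
      by_cases hm : x ∈ PySem.Set.ofList l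
      · have hmf : x ∈ (PySem.Set.ofList l).filter p := List.mem_filter.mpr ⟨hm, hp⟩
        rw [if_pos hmf, if_pos hm]
      · have hmf : x ∉ (PySem.Set.ofList l).filter p := fun hc => hm (List.mem_filter.mp hc).1
        rw [if_neg hmf, if_neg hm, List.filter_append]
        simp [hp]
    · simp only [List.filter_cons, hp]
      simp only [Bool.false_eq_true, if_false, List.filter_nil, List.append_nil]
      rw [ih, pv_add_eq]
      by_cases hm : x ∈ PySem.Set.ofList l
      · rw [if_pos hm]
      · rw [if_neg hm, List.filter_append]
        simp [hp]

lemma pv_ofList_map_inj {α β : Type} [BEq α] [LawfulBEq α] [BEq β] [LawfulBEq β] (f : α → β) (l : List α)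
    (hinj : ∀ x ∈ l, ∀ y ∈ l, f x = f y → x = y) :
    PySem.Set.ofList (l.map f) = (PySem.Set.ofList l).map f := by
  induction l using List.reverseRecOn with
  | nil => rfl
  | append_singleton l x ih =>
    have hinj' : ∀ a ∈ l, ∀ b ∈ l, f a = f b → a = b := by
      intro a ha b hb
      exact hinj a (by simp [ha]) b (by simp [hb])
    rw [List.map_append, List.map_cons, List.map_nil, pv_ofList_append_singleton,
        pv_ofList_append_singleton, ih hinj', pv_add_eq, pv_add_eq]
    by_cases hm : x ∈ PySem.Set.ofList l
    · have : f x ∈ (PySem.Set.ofList l).map f := List.mem_map_of_mem hm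
      rw [if_pos this, if_pos hm]
    · have : f x ∉ (PySem.Set.ofList l).map f := by
        intro hc
        rcases List.mem_map.mp hc with ⟨y, hy, hfy⟩
        have hyl : y ∈ l := (PySem.Set.mem_ofList l y).mp hy
        have : y = x := hinj y (by simp [hyl]) x (by simp) hfy
        exact hm (this ▸ hy)
      rw [if_neg this, if_neg hm, List.map_append]
      rfl

lemma pv_dic_getD (l : List (List String)) :
    ∀ (d : PySem.Dict String (PySem.Set String)) (b : String),
      (l.foldl (fun d t => d.modify (pvSnd t) PySem.Set.empty
          (fun s => PySem.Set.add s (pvFst t))) d).getD b PySem.Set.empty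
      = PySem.Set.update (d.getD b PySem.Set.empty)
          ((l.filter (fun t => pvSnd t == b)).map pvFst) := by
  induction l with
  | nil => intro d b; rfl
  | cons t l ih =>
    intro d b
    rw [List.foldl_cons, ih, List.filter_cons]
    by_cases he : pvSnd t = b
    · subst he
      simp only [beq_self_eq_true, if_pos]
      rw [List.map_cons, PySem.Set.update_cons, PySem.Dict.getD_modify_self]
    · have hbe : (pvSnd t == b) = false := beq_false_of_ne he
      simp only [hbe, Bool.false_eq_true, if_false]
      rw [PySem.Dict.getD_modify_of_ne _ _ _ (Ne.symm he)]

lemma pv_incFold {β : Type} (c : β → Prop) [DecidablePred c] (f : β → Int) :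
    ∀ (L : List β) (a : List Int), (∀ x ∈ L, c x → 0 ≤ f x ∧ f x < (a.length : Int)) →
      (L.foldl (fun a x => if c x then pvInc (f x) a else a) a).length = a.length ∧
      ∀ m : Nat, PySem.List.pyGetD (L.foldl (fun a x => if c x then pvInc (f x) a else a) a) (m : Int) 0
        = PySem.List.pyGetD a (m : Int) 0
          + (L.countP (fun x => decide (c x) && (f x == (m : Int))) : Int) := by
  intro L
  induction L with
  | nil => intro a hb; exact ⟨rfl, fun m => by simp⟩
  | cons x L ih =>
    intro a hb
    simp only [List.foldl_cons]
    by_cases hc : c x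
    · have hbx := hb x (List.mem_cons_self ..) hc
      set n := (f x).toNat with hn
      have hfn : f x = (n : Int) := (Int.toNat_of_nonneg hbx.1).symm
      have hnlen : n < a.length := by omega
      have hlen1 : (pvInc (f x) a).length = a.length := by
        unfold pvInc; rw [PySem.List.length_pySetD]
      have hb' : ∀ y ∈ L, c y → 0 ≤ f y ∧ f y < ((pvInc (f x) a).length : Int) := by
        intro y hy hcy; rw [hlen1]; exact hb y (List.mem_cons_of_mem _ hy) hcy
      obtain ⟨ihlen, ihget⟩ := ih (pvInc (f x) a) hb'
      simp only [if_pos hc]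
      refine ⟨by rw [ihlen, hlen1], ?_⟩
      intro m
      rw [ihget m]
      have hstep : PySem.List.pyGetD (pvInc (f x) a) (m : Int) 0
          = PySem.List.pyGetD a (m : Int) 0 + (if f x == (m : Int) then 1 else 0) := by
        unfold pvInc
        rw [hfn, PySem.List.pyGetD_pySetD_natCast _ _ _ _ _ hnlen]
        by_cases hm : m = n
        · subst hm; simp
        · have : ((n : Int) == (m : Int)) = false := by
            simp only [beq_eq_false_iff_ne, ne_eq]
            intro h
            exact hm (by exact_mod_cast h.symm)
          simp [hm, this]
      rw [hstep, List.countP_cons]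
      have : (decide (c x) && (f x == (m : Int))) = (f x == (m : Int)) := by
        simp [hc]
      rw [this]
      by_cases hq : f x = (m : Int)
      · simp [hq]; ring
      · have : (f x == (m : Int)) = false := beq_false_of_ne hq
        simp [this]
    · have hb' : ∀ y ∈ L, c y → 0 ≤ f y ∧ f y < ((a : List Int).length : Int) :=
        fun y hy hcy => hb y (List.mem_cons_of_mem _ hy) hcy
      obtain ⟨ihlen, ihget⟩ := ih a hb'
      simp only [if_neg hc]
      refine ⟨ihlen, ?_⟩
      intro m
      rw [ihget m, List.countP_cons]
      simp [hc]

lemma pv_incFold0 (f : String → Int) (L : List String) (a : List Int)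
    (hb : ∀ x ∈ L, 0 ≤ f x ∧ f x < (a.length : Int)) :
    (L.foldl (fun a x => pvInc (f x) a) a).length = a.length ∧
    ∀ m : Nat, PySem.List.pyGetD (L.foldl (fun a x => pvInc (f x) a) a) (m : Int) 0
      = PySem.List.pyGetD a (m : Int) 0 + (L.countP (fun x => f x == (m : Int)) : Int) := by
  have h := pv_incFold (fun _ : String => True) f L a (fun x hx _ => hb x hx)
  simpa using h

lemma pv_groupFold {β : Type} (c : β → Prop) [DecidablePred c] (grp : β → List String) (f : String → Int) :
    ∀ (G : List β) (a : List Int), (∀ b ∈ G, c b → ∀ r ∈ grp b, 0 ≤ f r ∧ f r < (a.length : Int)) →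
      (G.foldl (fun ans b => if c b then (grp b).foldl (fun a r => pvInc (f r) a) ans else ans) a).length = a.length ∧
      ∀ m : Nat, PySem.List.pyGetD
          (G.foldl (fun ans b => if c b then (grp b).foldl (fun a r => pvInc (f r) a) ans else ans) a) (m : Int) 0
        = PySem.List.pyGetD a (m : Int) 0
          + ((G.map (fun b => if c b then (grp b).countP (fun r => f r == (m : Int)) else 0)).sum : Int) := by
  intro G
  induction G with
  | nil => intro a hb; exact ⟨rfl, fun m => by simp⟩
  | cons g G ih =>
    intro a hb
    simp only [List.foldl_cons]
    by_cases hc : c g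
    · obtain ⟨glen, gget⟩ := pv_incFold0 f (grp g) a (hb g (List.mem_cons_self ..) hc)
      have hb' : ∀ b ∈ G, c b → ∀ r ∈ grp b,
          0 ≤ f r ∧ f r < (((grp g).foldl (fun a r => pvInc (f r) a) a).length : Int) := by
        intro b hbm hcb r hr; rw [glen]; exact hb b (List.mem_cons_of_mem _ hbm) hcb r hr
      obtain ⟨ihlen, ihget⟩ := ih ((grp g).foldl (fun a r => pvInc (f r) a) a) hb'
      simp only [if_pos hc]
      refine ⟨by rw [ihlen, glen], ?_⟩
      intro m
      rw [ihget m, gget m, List.map_cons, List.sum_cons, if_pos hc]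
      push_cast
      ring
    · have hb' : ∀ b ∈ G, c b → ∀ r ∈ grp b, 0 ≤ f r ∧ f r < ((a : List Int).length : Int) :=
        fun b hbm => hb b (List.mem_cons_of_mem _ hbm)
      obtain ⟨ihlen, ihget⟩ := ih a hb'
      simp only [if_neg hc]
      refine ⟨ihlen, ?_⟩
      intro m
      rw [ihget m, List.map_cons, List.sum_cons, if_neg hc]
      simp

lemma pv_sum_single (B : List String) (x : String) (v : String → Nat)
    (hnd : B.Nodup) (hx : x ∈ B) :
    (B.map (fun b => if x == b then v b else 0)).sum = v x := by
  induction B with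
  | nil => cases hx
  | cons b B ih =>
    rw [List.map_cons, List.sum_cons]
    rcases List.mem_cons.mp hx with he | hm
    · subst he
      have hzero : ∀ y ∈ B.map (fun b => if x == b then v b else 0), y = 0 := by
        intro y hy
        rcases List.mem_map.mp hy with ⟨b', hb', rfl⟩
        have : x ≠ b' := fun h => (List.nodup_cons.mp hnd).1 (h ▸ hb')
        simp [beq_false_of_ne this]
      rw [List.sum_eq_zero hzero]
      simp
    · have : x ≠ b := fun h => by
        have := (List.nodup_cons.mp hnd).1
        exact this (h ▸ hm)
      rw [ih (List.nodup_cons.mp hnd).2 hm]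
      simp [beq_false_of_ne this]

lemma pv_group_countP (P : List (List String)) (B : List String) (c : String → Prop)
    [DecidablePred c] (q : List String → Bool)
    (hnd : B.Nodup) (hmem : ∀ t ∈ P, pvSnd t ∈ B) :
    (B.map (fun b => if c b then P.countP (fun t => (pvSnd t == b) && q t) else 0)).sum
      = P.countP (fun t => decide (c (pvSnd t)) && q t) := by
  induction P with
  | nil => simp
  | cons t P ih =>
    have hmem' : ∀ s ∈ P, pvSnd s ∈ B := fun s hs => hmem s (List.mem_cons_of_mem _ hs)
    have hsplit : (fun b => if c b then (t :: P).countP (fun s => (pvSnd s == b) && q s) else 0)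
        = fun b => (if c b then P.countP (fun s => (pvSnd s == b) && q s) else 0)
            + (if pvSnd t == b then (if decide (c b) && q t then 1 else 0) else 0) := by
      funext b
      rw [List.countP_cons]
      by_cases hcb : c b
      · simp only [hcb, if_true, decide_true, Bool.true_and]
        by_cases hsb : (pvSnd t == b) = true
        · simp [hsb, Bool.and_comm]
        · simp only [Bool.not_eq_true] at hsb
          simp [hsb]
      · simp [hcb]
    rw [hsplit, List.sum_map_add]
    rw [ih hmem', pv_sum_single B (pvSnd t) _ hnd (hmem t (List.mem_cons_self ..)), List.countP_cons]

-- the shared characterisation both programs are reduced to: entry m of the answer counts the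
-- distinct pairs t with a ≥ k group and reporter index m
def pvCount (P : List (List String)) (id_list : List String) (k : Int) (m : Nat) : Nat :=
  P.countP (fun t => decide (k ≤ ((P.countP (fun s => pvSnd s == pvSnd t) : Nat) : Int))
    && (pvIota id_list (pvFst t) == (m : Int)))

-- A's final keys-fold equals the characterisation
lemma pv_A_char (k : Int) (id_list : List String) (P : List (List String))
    (dic : PySem.Dict String (PySem.Set String))
    (hnd : dic.keys.Nodup)
    (hkeys : ∀ t ∈ P, pvSnd t ∈ dic.keys)
    (hSb : ∀ b, dic.getD b PySem.Set.empty = (P.filter (fun t => pvSnd t == b)).map pvFst)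
    (hmem : ∀ t ∈ P, k ≤ ((P.countP (fun s => pvSnd s == pvSnd t) : Nat) : Int) →
      pvFst t ∈ id_list) :
    (List.foldl (fun ans b => if k ≤ PySem.Set.len (dic.getD b PySem.Set.empty) then
        List.foldl (fun a r => pvInc (pvIota id_list r) a) ans (dic.getD b PySem.Set.empty) else ans)
      (List.replicate id_list.length 0) dic.keys).length = id_list.length ∧
    ∀ m : Nat, PySem.List.pyGetD
        (List.foldl (fun ans b => if k ≤ PySem.Set.len (dic.getD b PySem.Set.empty) then
          List.foldl (fun a r => pvInc (pvIota id_list r) a) ans (dic.getD b PySem.Set.empty) else ans)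
        (List.replicate id_list.length 0) dic.keys) (m : Int) 0
      = (pvCount P id_list k m : Int) := by
  have hιP : ∀ t ∈ P, k ≤ ((P.countP (fun s => pvSnd s == pvSnd t) : Nat) : Int) →
      0 ≤ pvIota id_list (pvFst t) ∧ pvIota id_list (pvFst t) < (id_list.length : Int) :=
    fun t ht hk => pv_iota_range id_list _ (hmem t ht hk)
  have hlenb : ∀ b, PySem.Set.len (dic.getD b PySem.Set.empty)
      = ((P.countP (fun t => pvSnd t == b) : Nat) : Int) := by
    intro b
    rw [hSb b]
    simp only [PySem.Set.len, List.length_map]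
    rw [List.countP_eq_length_filter]
  have hbndA : ∀ b ∈ dic.keys, k ≤ PySem.Set.len (dic.getD b PySem.Set.empty) →
      ∀ r ∈ dic.getD b PySem.Set.empty,
      0 ≤ pvIota id_list r ∧ pvIota id_list r < (((List.replicate id_list.length (0:Int))).length : Int) := by
    intro b hb hcb r hr
    rw [List.length_replicate]
    rw [hlenb b] at hcb
    rw [hSb b] at hr
    rcases List.mem_map.mp hr with ⟨t, htf, rfl⟩
    have hbt : pvSnd t = b := eq_of_beq (List.mem_filter.mp htf).2
    refine hιP t (List.mem_of_mem_filter htf) ?_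
    rw [hbt]
    exact hcb
  obtain ⟨hAlen, hAget⟩ := pv_groupFold (fun b => k ≤ PySem.Set.len (dic.getD b PySem.Set.empty))
    (fun b => dic.getD b PySem.Set.empty) (pvIota id_list) dic.keys (List.replicate id_list.length 0) hbndA
  refine ⟨by rw [hAlen, List.length_replicate], ?_⟩
  intro m
  rw [hAget m]
  have hbase : PySem.List.pyGetD (List.replicate id_list.length (0:Int)) (m : Int) 0 = 0 := by
    simp
  rw [hbase]
  have hterm : (fun b => if k ≤ PySem.Set.len (dic.getD b PySem.Set.empty) then
        (dic.getD b PySem.Set.empty).countP (fun r => pvIota id_list r == (m : Int)) else 0)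
      = (fun b => if k ≤ ((P.countP (fun t => pvSnd t == b) : Nat) : Int) then
          P.countP (fun t => (pvSnd t == b) && (pvIota id_list (pvFst t) == (m : Int))) else 0) := by
    funext b
    rw [hlenb b, hSb b, List.countP_map, List.countP_filter]
    by_cases hc : k ≤ ((P.countP (fun t => pvSnd t == b) : Nat) : Int)
    · rw [if_pos hc, if_pos hc]
      refine List.countP_congr ?_
      intro x hx
      simp only [Function.comp_def, Bool.and_comm]
    · rw [if_neg hc, if_neg hc]
  rw [hterm]
  have := pv_group_countP P dic.keys
    (fun b => k ≤ ((P.countP (fun t => pvSnd t == b) : Nat) : Int))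
    (fun t => pvIota id_list (pvFst t) == (m : Int)) hnd hkeys
  unfold pvCount
  simp only [this]
  simp

-- a constant condition pulled out of a countP
lemma pv_countP_const {β : Type} (L : List β) (c : Bool) (q : β → Bool) :
    L.countP (fun x => c && q x) = if c then L.countP q else 0 := by
  cases c
  · simp
  · simp

-- after dropping the run of target t from a key-sorted list, every remaining target exceeds t
lemma pv_sorted_dropWhile_gt (t : String) :
    ∀ (l : List (List String)), l.Pairwise (fun x y => pvSnd x ≤ pvSnd y) →
      (∀ x ∈ l, t ≤ pvSnd x) →
      ∀ q ∈ l.dropWhile (fun q => pvSnd q == t), t < pvSnd q := by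
  intro l
  induction l with
  | nil => intro _ _ q hq; cases hq
  | cons x l ih =>
    intro hpw hall q hq
    by_cases hx : (pvSnd x == t) = true
    · simp only [List.dropWhile_cons, hx, if_true] at hq
      exact ih (List.pairwise_cons.mp hpw).2
        (fun y hy => hall y (List.mem_cons_of_mem _ hy)) q hq
    · simp only [List.dropWhile_cons, hx] at hq
      have hxt : t < pvSnd x := by
        rcases lt_or_eq_of_le (hall x (List.mem_cons_self ..)) with h | h
        · exact h
        · exact absurd (beq_iff_eq.mpr h.symm) (by simpa using hx)
      rcases List.mem_cons.mp hq with rfl | hq'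
      · exact hxt
      · exact lt_of_lt_of_le hxt ((List.pairwise_cons.mp hpw).1 q hq')

-- B's run-scanning loop equals the characterisation, on any key-sorted pair list
lemma pv_altLoop_char (id_list : List String) (k : Int) :
    ∀ (N : Nat) (S : List (List String)) (a : List Int), S.length ≤ N →
      S.Pairwise (fun x y => pvSnd x ≤ pvSnd y) →
      (∀ t ∈ S, k ≤ ((S.countP (fun s => pvSnd s == pvSnd t) : Nat) : Int) →
        0 ≤ pvIota id_list (pvFst t) ∧ pvIota id_list (pvFst t) < (a.length : Int)) →
      (pvAltLoop (pvIdxD id_list) k S a).length = a.length ∧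
      ∀ m : Nat, PySem.List.pyGetD (pvAltLoop (pvIdxD id_list) k S a) (m : Int) 0
        = PySem.List.pyGetD a (m : Int) 0
          + (S.countP (fun t => decide (k ≤ ((S.countP (fun s => pvSnd s == pvSnd t) : Nat) : Int))
              && (pvIota id_list (pvFst t) == (m : Int))) : Int) := by
  intro N
  induction N with
  | zero =>
    intro S a hN _ _
    have : S = [] := List.eq_nil_of_length_eq_zero (Nat.le_zero.mp hN)
    subst this
    refine ⟨by simp [pvAltLoop], fun m => by simp [pvAltLoop]⟩
  | succ N ih =>
    intro S a hN hsort hbnd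
    match S with
    | [] => refine ⟨by simp [pvAltLoop], fun m => by simp [pvAltLoop]⟩
    | p :: ps =>
      simp only [pvAltLoop]
      set G : List (List String) := p :: ps.takeWhile (fun q => pvSnd q == pvSnd p) with hG
      set R : List (List String) := ps.dropWhile (fun q => pvSnd q == pvSnd p) with hR
      have hsplit : p :: ps = G ++ R := by
        rw [hG, hR, List.cons_append, List.takeWhile_append_dropWhile]
      -- every pair in the run has target pvSnd p
      have hGt : ∀ q ∈ G, pvSnd q = pvSnd p := by
        intro q hq
        rcases List.mem_cons.mp hq with rfl | hq'
        · rfl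
        · exact eq_of_beq (by simpa using List.mem_takeWhile_imp hq')
      -- every pair after the run has a strictly larger target
      have hRt : ∀ q ∈ R, pvSnd p < pvSnd q := by
        rw [hR]
        exact pv_sorted_dropWhile_gt (pvSnd p) ps (List.pairwise_cons.mp hsort).2
          (fun x hx => (List.pairwise_cons.mp hsort).1 x hx)
      -- counts in S split: run members count the whole run, later members count only R
      have hcntG : ∀ q ∈ G, (p :: ps).countP (fun s => pvSnd s == pvSnd q) = G.length := by
        intro q hq
        rw [hGt q hq, hsplit, List.countP_append]
        have h1 : G.countP (fun s => pvSnd s == pvSnd p) = G.length :=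
          List.countP_eq_length.mpr (fun s hs => beq_iff_eq.mpr (hGt s hs))
        have h2 : R.countP (fun s => pvSnd s == pvSnd p) = 0 :=
          List.countP_eq_zero.mpr (fun s hs => by
            simp only [beq_iff_eq]
            exact fun h => absurd h (ne_of_gt (hRt s hs)))
        rw [h1, h2]
        omega
      have hcntR : ∀ q ∈ R, (p :: ps).countP (fun s => pvSnd s == pvSnd q)
          = R.countP (fun s => pvSnd s == pvSnd q) := by
        intro q hq
        rw [hsplit, List.countP_append]
        have h1 : G.countP (fun s => pvSnd s == pvSnd q) = 0 :=
          List.countP_eq_zero.mpr (fun s hs => by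
            simp only [beq_iff_eq]
            rw [hGt s hs]
            exact fun h => absurd h (ne_of_lt (hRt q hq)))
        rw [h1]
        omega
      -- the run update
      have hGbnd : k ≤ (G.length : Int) → ∀ q ∈ G,
          0 ≤ pvIota id_list (pvFst q) ∧ pvIota id_list (pvFst q) < (a.length : Int) := by
        intro hk q hq
        refine hbnd q (hsplit ▸ List.mem_append_left R hq) ?_
        rw [hcntG q hq]
        exact hk
      set a' : List Int := if k ≤ (G.length : Int) then
          G.foldl (fun a q =>
            PySem.List.pySetD a ((pvIdxD id_list).getD (pvFst q) 0)
              (PySem.List.pyGetD a ((pvIdxD id_list).getD (pvFst q) 0) 0 + 1)) a else a with ha'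
      have ha'spec : a'.length = a.length ∧
          ∀ m : Nat, PySem.List.pyGetD a' (m : Int) 0
            = PySem.List.pyGetD a (m : Int) 0
              + (if k ≤ (G.length : Int) then
                  (G.countP (fun q => pvIota id_list (pvFst q) == (m : Int)) : Int) else 0) := by
        rw [ha']
        by_cases hk : k ≤ (G.length : Int)
        · simp only [if_pos hk]
          obtain ⟨h1, h2⟩ := pv_incFold0 (fun r => pvIota id_list r) (G.map pvFst) a
            (by
              intro x hx
              rcases List.mem_map.mp hx with ⟨q, hq, rfl⟩
              exact hGbnd hk q hq)
          rw [List.foldl_map] at h1 h2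
          refine ⟨?_, fun m => ?_⟩
          · exact h1
          · rw [show (G.foldl (fun a q =>
                PySem.List.pySetD a ((pvIdxD id_list).getD (pvFst q) 0)
                  (PySem.List.pyGetD a ((pvIdxD id_list).getD (pvFst q) 0) 0 + 1)) a)
              = (G.foldl (fun a q => pvInc (pvIota id_list (pvFst q)) a) a) from rfl]
            rw [h2 m, List.countP_map]
            rfl
        · refine ⟨by simp [if_neg hk], fun m => by simp [if_neg hk]⟩
      -- inductive hypothesis on the rest
      have hRlen : R.length ≤ N := by
        have h1 : R.length ≤ ps.length := List.length_dropWhile_le ..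
        have h2 : ps.length ≤ N := by
          have := hN
          simp only [List.length_cons] at this
          omega
        omega
      have hRpw : R.Pairwise (fun x y => pvSnd x ≤ pvSnd y) :=
        (List.pairwise_cons.mp hsort).2.sublist (hR ▸ List.dropWhile_sublist _)
      have hRbnd : ∀ q ∈ R, k ≤ ((R.countP (fun s => pvSnd s == pvSnd q) : Nat) : Int) →
          0 ≤ pvIota id_list (pvFst q) ∧ pvIota id_list (pvFst q) < (a'.length : Int) := by
        intro q hq hk
        rw [ha'spec.1]
        refine hbnd q (hsplit ▸ List.mem_append_right G hq) ?_
        rw [hcntR q hq]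
        exact hk
      obtain ⟨ihlen, ihget⟩ := ih R a' hRlen hRpw hRbnd
      refine ⟨by rw [ihlen, ha'spec.1], ?_⟩
      intro m
      rw [ihget m, ha'spec.2 m]
      -- the countP over S splits into run + rest
      have hS : ((p :: ps).countP (fun q =>
            decide (k ≤ (((p :: ps).countP (fun s => pvSnd s == pvSnd q) : Nat) : Int))
            && (pvIota id_list (pvFst q) == (m : Int))) : Nat)
          = (if k ≤ (G.length : Int) then
              G.countP (fun q => pvIota id_list (pvFst q) == (m : Int)) else 0)
            + R.countP (fun q =>
                decide (k ≤ ((R.countP (fun s => pvSnd s == pvSnd q) : Nat) : Int))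
                && (pvIota id_list (pvFst q) == (m : Int))) := by
        have hsplit' := congrArg (fun l : List (List String) => l.countP (fun q =>
            decide (k ≤ (((p :: ps).countP (fun s => pvSnd s == pvSnd q) : Nat) : Int))
            && (pvIota id_list (pvFst q) == (m : Int)))) hsplit
        simp only [List.countP_append] at hsplit'
        rw [hsplit']
        congr 1
        · have hcongr : G.countP (fun q =>
              decide (k ≤ (((p :: ps).countP (fun s => pvSnd s == pvSnd q) : Nat) : Int))
              && (pvIota id_list (pvFst q) == (m : Int)))
            = G.countP (fun q => decide (k ≤ (G.length : Int))
              && (pvIota id_list (pvFst q) == (m : Int))) := by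
            refine List.countP_congr ?_
            intro q hq
            rw [hcntG q hq]
          rw [hcongr, pv_countP_const]
          simp only [decide_eq_true_eq]
        · refine List.countP_congr ?_
          intro q hq
          rw [hcntR q hq]
      rw [hS]
      push_cast
      by_cases hk : k ≤ (G.length : Int)
      · simp only [if_pos hk]; ring
      · simp only [if_neg hk]; ring

-- ===== VERDICT (by name: the statement is the Claim_ definition above) =====
theorem solution_spec : Claim_equal_solution := by
  intro id_list report k _hdom hpre
  unfold Spec_solution
  unfold Pre_solution at hpre
  unfold solution solution_alt
  dsimp only
  rw [pv_A_init id_list]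
  dsimp only
  have htoklen : ∀ t ∈ report.map (fun rep => PySem.Str.split₀ rep), t.length = 2 := by
    intro t ht
    rcases List.mem_map.mp ht with ⟨rep, hrep, rfl⟩
    exact (hpre rep hrep).1
  have htokmem : ∀ t ∈ report.map (fun rep => PySem.Str.split₀ rep),
      pvFst t ∈ id_list ∨
      (((PySem.List.dedup (report.map (fun rep => PySem.Str.split₀ rep))).countP
        (fun s => pvSnd s == pvSnd t) : Nat) : Int) < k := by
    intro t ht
    rcases List.mem_map.mp ht with ⟨rep, hrep, rfl⟩
    exact (hpre rep hrep).2
  set toks := report.map (fun rep => PySem.Str.split₀ rep) with htoks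
  -- A's dict loop over report is the same loop over the split lines
  have hAdic1 : (report.foldl (fun (d : PySem.Dict String (PySem.Set String)) rep =>
      match PySem.Str.split₀ rep with
      | [usr, bad] => d.modify bad PySem.Set.empty (fun s => s.add usr)
      | _ => d) PySem.Dict.empty)
    = toks.foldl (fun (d : PySem.Dict String (PySem.Set String)) t =>
      match t with
      | [usr, bad] => d.modify bad PySem.Set.empty (fun s => s.add usr)
      | _ => d) PySem.Dict.empty := (Eq.symm List.foldl_map)
  have hAdic2 : (toks.foldl (fun (d : PySem.Dict String (PySem.Set String)) t =>
      match t with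
      | [usr, bad] => d.modify bad PySem.Set.empty (fun s => s.add usr)
      | _ => d) PySem.Dict.empty)
    = toks.foldl (fun (d : PySem.Dict String (PySem.Set String)) t =>
        d.modify (pvSnd t) PySem.Set.empty (fun s => s.add (pvFst t))) PySem.Dict.empty := by
    refine PySem.List.foldl_congr_mem toks _ _ _ ?_
    intro d t ht
    have h2 := htoklen t ht
    match t, h2 with
    | [u, b], _ => rfl
  rw [hAdic1, hAdic2]
  simp only [PySem.List.dedup_eq_ofList]
  set P := PySem.Set.ofList toks with hPdef
  set dicC := toks.foldl (fun (d : PySem.Dict String (PySem.Set String)) t =>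
      d.modify (pvSnd t) PySem.Set.empty (fun s => s.add (pvFst t))) PySem.Dict.empty with hdicC
  have hPlen : ∀ t ∈ P, t.length = 2 := fun t ht =>
    htoklen t ((PySem.Set.mem_ofList toks t).mp ht)
  have hPmem : ∀ t ∈ P, k ≤ ((P.countP (fun s => pvSnd s == pvSnd t) : Nat) : Int) →
      pvFst t ∈ id_list := by
    intro t ht hk
    rcases htokmem t ((PySem.Set.mem_ofList toks t).mp ht) with h | h
    · exact h
    · rw [PySem.List.dedup_eq_ofList] at h
      exact absurd hk (not_le.mpr h)
  have hkeysnodup : dicC.keys.Nodup := by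
    rw [hdicC]
    exact PySem.Dict.nodup_keys_foldl_modify_key toks pvSnd PySem.Set.empty
      (fun _ t => fun s => s.add (pvFst t)) PySem.Dict.empty
      (by rw [PySem.Dict.keys_empty]; exact List.nodup_nil)
  have hkeys : dicC.keys = PySem.Set.ofList (toks.map pvSnd) := by
    rw [hdicC]
    have h := PySem.Dict.keys_foldl_modify_key toks pvSnd PySem.Set.empty
      (fun _ t => fun s => PySem.Set.add s (pvFst t)) PySem.Dict.empty
    rw [PySem.Dict.keys_empty, PySem.Set.update_nil_left] at h
    exact h
  have hSb : ∀ b, dicC.getD b PySem.Set.empty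
      = (P.filter (fun t => pvSnd t == b)).map pvFst := by
    intro b
    rw [hdicC, pv_dic_getD toks PySem.Dict.empty b, PySem.Dict.getD_empty,
        PySem.Set.update_empty]
    have hinj : ∀ x ∈ toks.filter (fun t => pvSnd t == b),
        ∀ y ∈ toks.filter (fun t => pvSnd t == b), pvFst x = pvFst y → x = y := by
      intro x hx y hy hf
      have hx2 := htoklen x (List.mem_of_mem_filter hx)
      have hy2 := htoklen y (List.mem_of_mem_filter hy)
      have hbx : pvSnd x = b := by
        have := (List.mem_filter.mp hx).2
        exact eq_of_beq this
      have hby : pvSnd y = b := by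
        have := (List.mem_filter.mp hy).2
        exact eq_of_beq this
      rw [pv_pair_shape x hx2, pv_pair_shape y hy2, hf, hbx, hby]
    rw [pv_ofList_map_inj pvFst _ hinj, pv_ofList_filter]
  -- A's side reduced to the characterisation
  rw [PySem.Dict.values_eq_map_keys dicC hkeysnodup PySem.Set.empty, List.foldl_map]
  obtain ⟨hAlen, hAget⟩ := pv_A_char k id_list P dicC hkeysnodup
    (fun t ht => by
      rw [hkeys]
      exact (PySem.Set.mem_ofList _ _).mpr (List.mem_map_of_mem ((PySem.Set.mem_ofList toks t).mp ht)))
    hSb hPmem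
  -- B's side reduced to the characterisation
  set S := PySem.List.sorted P (fun p => p.getD 1 "") false with hSdef
  have hSperm : S.Perm P := PySem.List.sorted_perm ..
  have hSpw : S.Pairwise (fun x y => pvSnd x ≤ pvSnd y) :=
    PySem.List.sorted_pairwise ..
  have hScnt : ∀ (q : List String → Bool), S.countP q = P.countP q :=
    fun q => hSperm.countP_eq q
  have hSbnd : ∀ t ∈ S, k ≤ ((S.countP (fun s => pvSnd s == pvSnd t) : Nat) : Int) →
      0 ≤ pvIota id_list (pvFst t) ∧
        pvIota id_list (pvFst t) < ((List.replicate id_list.length (0:Int)).length : Int) := by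
    intro t ht hk
    rw [List.length_replicate]
    rw [hScnt] at hk
    exact pv_iota_range id_list _ (hPmem t (hSperm.mem_iff.mp ht) hk)
  obtain ⟨hBlen, hBget⟩ := pv_altLoop_char id_list k S.length S
    (List.replicate id_list.length 0) le_rfl hSpw hSbnd
  have hBfix : (PySem.List.enumerate id_list).foldl
      (fun (d : PySem.Dict String Int) iu => d.insert iu.2 iu.1) PySem.Dict.empty
      = pvIdxD id_list := rfl
  rw [hBfix]
  -- conclude elementwise
  refine List.ext_getElem (hAlen.trans (hBlen.trans (List.length_replicate)).symm) ?_
  intro n h1 h2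
  have getElem_eq : ∀ (xs : List Int) (n : Nat) (h : n < xs.length),
      xs[n] = PySem.List.pyGetD xs (n : Int) 0 := by
    intro xs n h
    rw [PySem.List.pyGetD_natCast, List.getD_eq_getElem _ _ h]
  have hBcnt : (S.countP (fun t => decide (k ≤ ((S.countP (fun s => pvSnd s == pvSnd t) : Nat) : Int))
      && (pvIota id_list (pvFst t) == (n : Int))) : Nat) = pvCount P id_list k n := by
    unfold pvCount
    rw [hScnt]
    refine List.countP_congr ?_
    intro t ht
    rw [hScnt]
  have hB' : PySem.List.pyGetD (pvAltLoop (pvIdxD id_list) k S (List.replicate id_list.length 0))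
      (n : Int) 0 = ((pvCount P id_list k n : Nat) : Int) := by
    rw [hBget n]
    have hb0 : PySem.List.pyGetD (List.replicate id_list.length (0:Int)) (n : Int) 0 = 0 := by simp
    rw [hb0, zero_add]
    exact_mod_cast congrArg (fun z : Nat => (z : Int)) hBcnt
  rw [getElem_eq _ n h1, getElem_eq _ n h2]
  exact (hAget n).trans hB'.symm
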